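-- pv_equiv track=rewrite | github.com/donia-fioklou/ProjetStageL3 | backend/src/agriApp/views/analyseBiologique/bio.py | ProduitAmdec
-- ===== SOURCE A (Python) =====
-- def ProduitAmdec(chaine):
--     chaine=str(chaine)
--     nombres = chaine.split('|')  # Divise la chaîne en liste de nombres en utilisant le séparateur '|'
--     produit = 1
--
--     for nombre in nombres:
--         try:
--             produit =produit* int(nombre)  # Convertit chaque nombre en entier et ajoute à la somme
--         except ValueError:
--             pass  # Ignore les valeurs qui ne peuvent pas être converties en entier
--
--     return produit
-- ===== SOURCE B (Python) =====
-- def _flush(produit, chars):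
--     # multiply in the finished token if it parses as an int, else leave produit
--     try:
--         return produit * int(''.join(chars))
--     except ValueError:
--         return produit
--
-- def ProduitAmdec(chaine):
--     # character-level state machine: no split(); accumulate the current token's
--     # characters and flush it into the product at each '|' and at end of string
--     s = str(chaine)
--     produit = 1
--     cur = []
--     for ch in s:
--         if ch == '|':
--             produit = _flush(produit, cur)
--             cur = []
--         else:
--             cur.append(ch)
--     return _flush(produit, cur)
-- ===== Notes on version B (the rewrite author's own statement) =====
-- stated objective: alternative
-- what changed: A splits the string on the separator and folds int() over the resulting token list; B never calls split: it runs a character-level state machine over the string, accumulating the current token's characters and flushing them into the product at each separator and at end of string.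
import Mathlib
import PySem

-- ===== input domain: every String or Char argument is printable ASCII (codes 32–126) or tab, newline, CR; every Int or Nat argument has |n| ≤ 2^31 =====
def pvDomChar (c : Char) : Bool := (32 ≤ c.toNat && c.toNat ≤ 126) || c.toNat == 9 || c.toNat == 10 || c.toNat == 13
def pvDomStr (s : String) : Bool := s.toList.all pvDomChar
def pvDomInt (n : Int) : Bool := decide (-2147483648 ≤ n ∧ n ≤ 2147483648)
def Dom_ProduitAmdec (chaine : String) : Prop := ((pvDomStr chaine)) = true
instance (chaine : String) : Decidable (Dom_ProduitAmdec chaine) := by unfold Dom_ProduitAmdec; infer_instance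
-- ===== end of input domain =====

-- B replaces A's split('|')-then-fold by a character-level state machine (accumulate the current token, flush into the product at each '|' and at end); same cost, different structure.


-- ===== PORT A =====
-- A: split on '|', then fold over the token list multiplying in each int()-parsable token.
def ProduitAmdec (chaine : String) : Int :=
  ((PySem.Str.split? chaine "|").getD []).foldl
    (fun produit nombre =>
      match PySem.Int.ofStr? nombre with
      | some n => produit * n
      | none => produit) 1

-- ===== PORT B =====
-- B helper _flush: multiply in the finished token if it parses, else leave produit.
def pvFlush (produit : Int) (chars : List Char) : Int :=
  match PySem.Int.ofChars? chars with
  | some n => produit * n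
  | none => produit

-- B: char-level state machine over the string; state = (product so far, current token chars).
def ProduitAmdec_alt (chaine : String) : Int :=
  let st := chaine.toList.foldl
    (fun (st : Int × List Char) ch =>
      if ch = '|' then (pvFlush st.1 st.2, [])
      else (st.1, st.2 ++ [ch])) (1, [])
  pvFlush st.1 st.2

-- ===== PRECONDITION & SPEC =====
def Spec_ProduitAmdec (chaine : String) (out : Int) : Prop := out = ProduitAmdec_alt chaine
instance (chaine : String) (out : Int) : Decidable (Spec_ProduitAmdec chaine out) := by unfold Spec_ProduitAmdec; infer_instance

-- ===== CLAIM (what is proved, stated in full; the proofs are below) =====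
def Claim_equal_ProduitAmdec : Prop := ∀ (chaine : String), Dom_ProduitAmdec chaine → Spec_ProduitAmdec chaine (ProduitAmdec chaine)

-- ===== LEMMAS AND PROOFS =====

-- (first token, remaining tokens) of splitting a char list on '|'
def pvTokens : List Char → List Char × List (List Char)
  | [] => ([], [])
  | c :: r =>
    let (h, ts) := pvTokens r
    if c = '|' then ([], h :: ts) else (c :: h, ts)

theorem pvGo_spec (sep : List Char) (hsep : sep = ['|']) :
    ∀ (l : List Char) (fuel : Nat) (cur : List Char) (acc : List (List Char)),
      l.length ≤ fuel →
      PySem.Chars.splitOn.go sep fuel l cur acc =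
        acc.reverse ++ (cur.reverse ++ (pvTokens l).1) :: (pvTokens l).2 := by
  subst hsep
  intro l
  induction l with
  | nil =>
    intro fuel cur acc _
    cases fuel <;> simp [PySem.Chars.splitOn.go, pvTokens]
  | cons c rest ih =>
    intro fuel cur acc hf
    cases fuel with
    | zero => simp at hf
    | succ f =>
      by_cases hc : c = '|'
      · subst hc
        rw [show PySem.Chars.splitOn.go ['|'] (f+1) ('|' :: rest) cur acc =
            PySem.Chars.splitOn.go ['|'] f rest [] (cur.reverse :: acc) by
          simp [PySem.Chars.splitOn.go, List.isPrefixOf]]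
        rw [ih f [] (cur.reverse :: acc) (by simpa using Nat.lt_succ_iff.mp (by simpa using hf))]
        simp [pvTokens]
      · rw [show PySem.Chars.splitOn.go ['|'] (f+1) (c :: rest) cur acc =
            PySem.Chars.splitOn.go ['|'] f rest (c :: cur) acc by
          simp [PySem.Chars.splitOn.go, List.isPrefixOf]
          intro h
          exact absurd h.symm hc]
        rw [ih f (c :: cur) acc (by simpa using Nat.lt_succ_iff.mp (by simpa using hf))]
        simp [pvTokens, hc]

theorem pvSplitOn_eq (cs : List Char) :
    PySem.Chars.splitOn cs ['|'] = (pvTokens cs).1 :: (pvTokens cs).2 := by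
  unfold PySem.Chars.splitOn
  rw [pvGo_spec ['|'] rfl cs (cs.length + 1) [] [] (by omega)]
  simp

theorem pvScan_spec (l : List Char) :
    ∀ (p : Int) (cur : List Char),
      pvFlush
        (l.foldl (fun (st : Int × List Char) ch =>
          if ch = '|' then (pvFlush st.1 st.2, [])
          else (st.1, st.2 ++ [ch])) (p, cur)).1
        (l.foldl (fun (st : Int × List Char) ch =>
          if ch = '|' then (pvFlush st.1 st.2, [])
          else (st.1, st.2 ++ [ch])) (p, cur)).2 =
      ((pvTokens l).2).foldl (fun q t => pvFlush q t) (pvFlush p (cur ++ (pvTokens l).1)) := by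
  induction l with
  | nil => intro p cur; simp [pvTokens]
  | cons c rest ih =>
    intro p cur
    by_cases hc : c = '|'
    · subst hc
      simp only [List.foldl]
      rw [if_pos True.intro, ih (pvFlush p cur) []]
      simp [pvTokens]
    · simp only [List.foldl]
      rw [if_neg hc, ih p (cur ++ [c])]
      simp [pvTokens, hc]

-- ===== VERDICT (by name: the statement is the Claim_ definition above) =====
theorem ProduitAmdec_spec : Claim_equal_ProduitAmdec := by
  intro chaine _
  show ProduitAmdec chaine = ProduitAmdec_alt chaine
  unfold ProduitAmdec ProduitAmdec_alt
  rw [show PySem.Str.split? chaine "|" =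
      some ((PySem.Chars.splitOn chaine.toList ['|']).map String.ofList) by
    simp [PySem.Str.split?, PySem.Chars.split?]]
  rw [pvSplitOn_eq, pvScan_spec chaine.toList 1 []]
  simp [List.foldl_map, pvFlush, PySem.Int.ofStr?]
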